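-- pv_equiv track=rewrite | github.com/ronald1971-debug/dixvision-v42.2 | cockpit/qr.py | _pad_bits
-- ===== SOURCE A (Python) =====
-- def _pad_bits(bits: list[int], total_data_codewords: int) -> list[int]:
--     # Terminator (up to 4 zero bits), pad to byte, then 0xEC 0x11 alternation.
--     max_bits = total_data_codewords * 8
--     bits = list(bits)
--     bits += [0] * min(4, max_bits - len(bits))
--     while len(bits) % 8 != 0:
--         bits.append(0)
--     pad = [0xEC, 0x11]
--     i = 0
--     while len(bits) < max_bits:
--         for b in range(7, -1, -1):
--             bits.append((pad[i % 2] >> b) & 1)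
--         i += 1
--     return bits[:max_bits]
-- ===== SOURCE B (Python) =====
-- def _pad_bits(bits: list[int], total_data_codewords: int) -> list[int]:
--     # Closed-form padding: counted extends + one sliced repetition of the 16-bit pad pattern.
--     max_bits = total_data_codewords * 8
--     out = list(bits)
--     out += [0] * min(4, max_bits - len(out))
--     out += [0] * ((8 - len(out) % 8) % 8)
--     P = [(0xEC >> b) & 1 for b in range(7, -1, -1)] + [(0x11 >> b) & 1 for b in range(7, -1, -1)]
--     remaining = max(0, max_bits - len(out))
--     out += (P * ((remaining + 15) // 16))[:remaining]
--     return out[:max_bits]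
-- ===== Notes on version B (the rewrite author's own statement) =====
-- stated objective: simpler
-- what changed: Replaces A's incremental while-loops (append one zero bit until byte-aligned; append pad bytes bit by bit until capacity) with closed-form counted extends: one arithmetic byte-alignment extend and one slice of the repeated 16-bit 0xEC/0x11 pattern.
import Mathlib
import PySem

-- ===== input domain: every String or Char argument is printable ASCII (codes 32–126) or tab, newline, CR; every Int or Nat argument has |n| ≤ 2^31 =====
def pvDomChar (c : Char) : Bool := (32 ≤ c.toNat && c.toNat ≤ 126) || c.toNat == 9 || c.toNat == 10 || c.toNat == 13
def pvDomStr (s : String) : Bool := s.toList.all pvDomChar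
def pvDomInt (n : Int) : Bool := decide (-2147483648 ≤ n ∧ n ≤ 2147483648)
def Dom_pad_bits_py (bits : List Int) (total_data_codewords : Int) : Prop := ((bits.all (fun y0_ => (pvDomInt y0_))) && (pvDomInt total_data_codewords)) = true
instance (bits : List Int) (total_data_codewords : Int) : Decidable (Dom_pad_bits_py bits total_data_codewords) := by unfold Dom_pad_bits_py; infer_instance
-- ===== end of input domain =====

-- ===== PORT A =====
-- B changes the padding loops into closed-form counted extends plus one sliced pattern repetition (objective: simpler).

-- inner `for b in range(7,-1,-1): bits.append((v >> b) & 1)` of A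
def pvAppendByte (xs : List Int) (v : Int) : List Int :=
  (PySem.List.pyRange 7 (-1) (-1)).foldl (fun acc b => acc ++ [PySem.Int.band (v >>> b.toNat) 1]) xs

theorem pvAppendByte_length (xs : List Int) (v : Int) : (pvAppendByte xs v).length = xs.length + 8 := by
  rw [pvAppendByte, PySem.List.foldl_append_singleton_eq_map]
  simp [List.length_append]

-- A's `while len(bits) % 8 != 0: bits.append(0)`
def pvAlignA (xs : List Int) : List Int :=
  if xs.length % 8 ≠ 0 then pvAlignA (xs ++ [0]) else xs
termination_by (8 - xs.length % 8) % 8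
decreasing_by simp only [List.length_append, List.length_cons, List.length_nil]; omega

-- A's `while len(bits) < max_bits:` fill loop
def pvFillA (xs : List Int) (i : Nat) (mb : Int) : List Int :=
  if (xs.length : Int) < mb then
    pvFillA (pvAppendByte xs (PySem.List.pyGetD ([0xEC, 0x11] : List Int) ((i % 2 : Nat) : Int) 0)) (i + 1) mb
  else xs
termination_by (mb - (xs.length : Int)).toNat
decreasing_by rw [pvAppendByte_length]; omega

def pad_bits_py (bits : List Int) (total_data_codewords : Int) : List Int :=
  let max_bits : Int := total_data_codewords * 8
  let bits1 := bits ++ List.replicate (min 4 (max_bits - (bits.length : Int))).toNat (0 : Int)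
  let bits2 := pvAlignA bits1
  let bits3 := pvFillA bits2 0 max_bits
  PySem.List.slice bits3 none (some max_bits)

-- ===== PORT B =====
def pad_bits_py_alt (bits : List Int) (total_data_codewords : Int) : List Int :=
  let max_bits : Int := total_data_codewords * 8
  let out1 := bits ++ List.replicate (min 4 (max_bits - (bits.length : Int))).toNat (0 : Int)
  let out2 := out1 ++ List.replicate ((8 - out1.length % 8) % 8) (0 : Int)
  let P : List Int :=
    (PySem.List.pyRange 7 (-1) (-1)).map (fun b => PySem.Int.band ((0xEC : Int) >>> b.toNat) 1)
      ++ (PySem.List.pyRange 7 (-1) (-1)).map (fun b => PySem.Int.band ((0x11 : Int) >>> b.toNat) 1)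
  -- `remaining` is a nonnegative Python int, so `(P * q)[:remaining]` is an exact `take`
  let remaining : Nat := (max 0 (max_bits - (out2.length : Int))).toNat
  let out3 := out2 ++ (List.replicate ((remaining + 15) / 16) P).flatten.take remaining
  PySem.List.slice out3 none (some max_bits)

-- ===== PRECONDITION & SPEC =====
def Spec_pad_bits_py (bits : List Int) (total_data_codewords : Int) (out : List Int) : Prop := out = pad_bits_py_alt bits total_data_codewords
instance (bits : List Int) (total_data_codewords : Int) (out : List Int) : Decidable (Spec_pad_bits_py bits total_data_codewords out) := by unfold Spec_pad_bits_py; infer_instance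

-- ===== CLAIM (what is proved, stated in full; the proofs are below) =====
def Claim_equal_pad_bits_py : Prop := ∀ (bits : List Int) (total_data_codewords : Int), Dom_pad_bits_py bits total_data_codewords → Spec_pad_bits_py bits total_data_codewords (pad_bits_py bits total_data_codewords)

-- ===== LEMMAS AND PROOFS =====

-- the byte A appends on iteration i of its fill loop
def pvPadByte (i : Nat) : List Int :=
  (PySem.List.pyRange 7 (-1) (-1)).map
    (fun b => PySem.Int.band (PySem.List.pyGetD ([0xEC, 0x11] : List Int) ((i % 2 : Nat) : Int) 0 >>> b.toNat) 1)

-- the bit list A's fill loop appends over n iterations starting at counter i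
def pvAlt : Nat → Nat → List Int
  | _, 0 => []
  | i, n + 1 => pvPadByte i ++ pvAlt (i + 1) n

theorem pvAlignA_eq (xs : List Int) :
    pvAlignA xs = xs ++ List.replicate ((8 - xs.length % 8) % 8) (0 : Int) := by
  fun_induction pvAlignA xs with
  | case1 xs h ih =>
    rw [ih, List.append_assoc]
    congr 1
    have : (0 : Int) :: List.replicate ((8 - (xs ++ [0]).length % 8) % 8) (0 : Int)
        = List.replicate ((8 - (xs ++ [0]).length % 8) % 8 + 1) (0 : Int) := by
      simp [List.replicate_succ]
    simp only [List.cons_append, List.nil_append] at this ⊢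
    rw [this]
    congr 1
    simp only [List.length_append, List.length_cons, List.length_nil]
    omega
  | case2 xs h =>
    simp only [ne_eq, not_not] at h
    simp [h]

theorem pvAppendByte_eq (xs : List Int) (v : Int) :
    pvAppendByte xs v
      = xs ++ (PySem.List.pyRange 7 (-1) (-1)).map (fun b => PySem.Int.band (v >>> b.toNat) 1) := by
  rw [pvAppendByte, PySem.List.foldl_append_singleton_eq_map]

theorem pvFillA_eq (n : Nat) : ∀ (xs : List Int) (i : Nat) (mb : Int),
    (mb - (xs.length : Int)).toNat = 8 * n → pvFillA xs i mb = xs ++ pvAlt i n := by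
  induction n with
  | zero =>
    intro xs i mb h
    rw [pvFillA]
    simp only [if_neg (by omega : ¬ ((xs.length : Int) < mb))]
    simp [pvAlt]
  | succ m ih =>
    intro xs i mb h
    rw [pvFillA]
    simp only [if_pos (by omega : (xs.length : Int) < mb)]
    rw [ih _ (i + 1) mb (by rw [pvAppendByte_length]; omega)]
    rw [pvAppendByte_eq, List.append_assoc]
    rfl

theorem pvAlt_add_two (n : Nat) : ∀ i, pvAlt (i + 2) n = pvAlt i n := by
  induction n with
  | zero => intro i; rfl
  | succ m ih =>
    intro i
    show pvPadByte (i + 2) ++ pvAlt (i + 3) m = pvPadByte i ++ pvAlt (i + 1) m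
    have h1 : pvPadByte (i + 2) = pvPadByte i := by
      simp [pvPadByte, Nat.add_mod_right]
    have h2 : pvAlt (i + 3) m = pvAlt (i + 1) m := ih (i + 1)
    rw [h1, h2]

-- B's pattern P, as a closed list
def pvP : List Int :=
  (PySem.List.pyRange 7 (-1) (-1)).map (fun b => PySem.Int.band ((0xEC : Int) >>> b.toNat) 1)
    ++ (PySem.List.pyRange 7 (-1) (-1)).map (fun b => PySem.Int.band ((0x11 : Int) >>> b.toNat) 1)

theorem pvP_eq : pvP = pvPadByte 0 ++ pvPadByte 1 := by decide

theorem pvP_length : pvP.length = 16 := by decide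

theorem pvCycleTake : ∀ n : Nat,
    (List.replicate ((8 * n + 15) / 16) pvP).flatten.take (8 * n) = pvAlt 0 n
  | 0 => by decide
  | 1 => by decide
  | (m + 2) => by
    have hq : (8 * (m + 2) + 15) / 16 = (8 * m + 15) / 16 + 1 := by omega
    rw [hq, List.replicate_succ, List.flatten_cons]
    have hl : 8 * (m + 2) = pvP.length + 8 * m := by rw [pvP_length]; omega
    rw [hl, List.take_length_add_append, pvCycleTake m]
    show pvP ++ pvAlt 0 m = pvPadByte 0 ++ (pvPadByte 1 ++ pvAlt 2 m)
    rw [pvAlt_add_two m 0, pvP_eq, List.append_assoc]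

-- ===== VERDICT (by name: the statement is the Claim_ definition above) =====
theorem pad_bits_py_spec : Claim_equal_pad_bits_py := by
  intro bits tdc _dom
  unfold Spec_pad_bits_py pad_bits_py pad_bits_py_alt
  simp only []
  set mb : Int := tdc * 8 with hmb
  set L0 : List Int := bits ++ List.replicate (min 4 (mb - (bits.length : Int))).toNat (0 : Int) with hL0
  set L1 : List Int := L0 ++ List.replicate ((8 - L0.length % 8) % 8) (0 : Int) with hL1
  have halign : pvAlignA L0 = L1 := pvAlignA_eq L0
  have hlen : L1.length % 8 = 0 := by
    rw [hL1]; simp only [List.length_append, List.length_replicate]; omega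
  have hrem : (max 0 (mb - (L1.length : Int))).toNat = (mb - (L1.length : Int)).toNat := by omega
  set n : Nat := (mb - (L1.length : Int)).toNat / 8 with hn
  have h8n : (mb - (L1.length : Int)).toNat = 8 * n := by
    rw [hn, hmb]; omega
  rw [halign, pvFillA_eq n L1 0 mb h8n, hrem, h8n]
  exact congrArg (fun z => PySem.List.slice (L1 ++ z) none (some mb)) (pvCycleTake n).symm
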